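-- pv_equiv track=rewrite | github.com/shshsunny/ComputerHomework | 本节课习题/Recursion-1.py | countHi2
-- ===== SOURCE A (Python) =====
-- def countHi2(str):#not done
--     if (str != 'hi' and len(str) < 3) or str == 'xhi':
--         return 0
--     if str[:2] == 'hi':
--         return countHi2(str[2:])+1
--     elif str[:3] == 'xhi':
--         return countHi2(str[3:])
--     else:return countHi2(str[1:])
-- ===== SOURCE B (Python) =====
-- def countHi2(str):
--     n = len(str)
--     i = 0
--     c = 0
--     while i + 1 < n:
--         if str[i] == 'h' and str[i + 1] == 'i':
--             c += 1
--             i += 2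
--         elif i + 2 < n and str[i] == 'x' and str[i + 1] == 'h' and str[i + 2] == 'i':
--             i += 3
--         else:
--             i += 1
--     return c
-- ===== Notes on version B (the rewrite author's own statement) =====
-- stated objective: faster
-- what changed: Replaces A's recursion that rebuilds a slice of the string at every step with a single iterative index scan (two/three/one-step pointer advances), removing both the recursion and the O(n) slicing per step.
import Mathlib
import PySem

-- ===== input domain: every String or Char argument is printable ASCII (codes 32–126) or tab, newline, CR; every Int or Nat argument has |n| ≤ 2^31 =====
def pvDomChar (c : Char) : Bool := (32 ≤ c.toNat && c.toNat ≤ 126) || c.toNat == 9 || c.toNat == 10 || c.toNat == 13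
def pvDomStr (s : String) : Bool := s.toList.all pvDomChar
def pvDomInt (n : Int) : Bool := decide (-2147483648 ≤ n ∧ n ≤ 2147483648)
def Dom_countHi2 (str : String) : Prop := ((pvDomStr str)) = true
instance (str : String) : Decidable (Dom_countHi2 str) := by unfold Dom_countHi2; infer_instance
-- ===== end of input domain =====

-- B replaces A's O(n^2) slice-building recursion by a single O(n) index scan (asymptotically faster).


-- ===== PORT A =====
-- termination helper for the port's recursion (cited in decreasing_by)
theorem pvAuxA_len {s : List Char}
    (hg : ¬ ((s ≠ ['h', 'i'] ∧ s.length < 3) ∨ s = ['x', 'h', 'i'])) : 2 ≤ s.length := by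
  rcases not_or.mp hg with ⟨h1, _⟩
  rcases not_and_or.mp h1 with h2 | h2
  · have : s = ['h', 'i'] := not_not.mp h2
    subst this; simp
  · omega

-- A's recursion over the string, on its character list; the nonnegative literal
-- slices str[:2], str[:3], str[2:], str[3:], str[1:] are exactly List.take / List.drop.
def pvAuxA (s : List Char) : Int :=
  if (s ≠ ['h', 'i'] ∧ s.length < 3) ∨ s = ['x', 'h', 'i'] then 0
  else if s.take 2 = ['h', 'i'] then pvAuxA (s.drop 2) + 1
  else if s.take 3 = ['x', 'h', 'i'] then pvAuxA (s.drop 3)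
  else pvAuxA (s.drop 1)
termination_by s.length
decreasing_by
  all_goals (simp only [List.length_drop]; have := pvAuxA_len (by assumption); omega)

def countHi2 (str : String) : Int := pvAuxA str.toList

-- ===== PORT B =====
-- B's while-loop over an index i; str[i] at an in-range index is List.getD.
def pvGoB (s : List Char) (i : Nat) (c : Int) : Int :=
  if i + 1 < s.length then
    if s.getD i ' ' = 'h' ∧ s.getD (i + 1) ' ' = 'i' then pvGoB s (i + 2) (c + 1)
    else if i + 2 < s.length ∧ s.getD i ' ' = 'x' ∧ s.getD (i + 1) ' ' = 'h' ∧ s.getD (i + 2) ' ' = 'i' then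
      pvGoB s (i + 3) c
    else pvGoB s (i + 1) c
  else c
termination_by s.length - i
decreasing_by all_goals omega

def countHi2_alt (str : String) : Int := pvGoB str.toList 0 0

-- ===== PRECONDITION & SPEC =====
def Spec_countHi2 (str : String) (out : Int) : Prop := out = countHi2_alt str
instance (str : String) (out : Int) : Decidable (Spec_countHi2 str out) := by unfold Spec_countHi2; infer_instance

-- ===== CLAIM (what is proved, stated in full; the proofs are below) =====
def Claim_equal_countHi2 : Prop := ∀ (str : String), Dom_countHi2 str → Spec_countHi2 str (countHi2 str)

-- ===== LEMMAS AND PROOFS =====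

-- How A's recursion acts on a suffix with at least two explicit leading characters.
theorem pvAuxA_hi (r : List Char) : pvAuxA ('h' :: 'i' :: r) = pvAuxA r + 1 := by
  rw [pvAuxA]
  have hne : ¬ ((('h' : Char) :: 'i' :: r ≠ ['h', 'i'] ∧ (('h' : Char) :: 'i' :: r).length < 3) ∨
      ('h' : Char) :: 'i' :: r = ['x', 'h', 'i']) := by
    simp
    intro h
    exact List.length_pos_of_ne_nil h
  rw [if_neg hne]
  simp [List.take]

theorem pvAuxA_xhi (r : List Char) : pvAuxA ('x' :: 'h' :: 'i' :: r) = pvAuxA r := by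
  rcases eq_or_ne r [] with hr | hr
  · subst hr
    rw [pvAuxA]
    simp [pvAuxA]
  · rw [pvAuxA]
    have hne : ¬ ((('x' : Char) :: 'h' :: 'i' :: r ≠ ['h', 'i'] ∧
        (('x' : Char) :: 'h' :: 'i' :: r).length < 3) ∨
        ('x' : Char) :: 'h' :: 'i' :: r = ['x', 'h', 'i']) := by
      simp [hr]
    rw [if_neg hne]
    simp [List.take]

theorem pvAuxA_two (a b : Char) (h : ¬ (a = 'h' ∧ b = 'i')) : pvAuxA [a, b] = 0 := by
  rw [pvAuxA]
  have hg : (([a, b] : List Char) ≠ ['h', 'i'] ∧ ([a, b] : List Char).length < 3) ∨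
      ([a, b] : List Char) = ['x', 'h', 'i'] := by
    simp
    intro ha hb
    exact absurd ⟨ha, hb⟩ h
  rw [if_pos hg]

theorem pvAuxA_step (a b c : Char) (r : List Char) (hab : ¬ (a = 'h' ∧ b = 'i'))
    (hx : ¬ (a = 'x' ∧ b = 'h' ∧ c = 'i')) : pvAuxA (a :: b :: c :: r) = pvAuxA (b :: c :: r) := by
  rw [pvAuxA]
  have hne : ¬ ((a :: b :: c :: r ≠ ['h', 'i'] ∧ (a :: b :: c :: r).length < 3) ∨
      a :: b :: c :: r = ['x', 'h', 'i']) := by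
    simp
    intro ha hb hc _
    exact absurd ⟨ha, hb, hc⟩ hx
  rw [if_neg hne]
  have ht2 : ¬ ((a :: b :: c :: r).take 2 = ['h', 'i']) := by
    simp [List.take]
    intro ha hb
    exact absurd ⟨ha, hb⟩ hab
  rw [if_neg ht2]
  have ht3 : ¬ ((a :: b :: c :: r).take 3 = ['x', 'h', 'i']) := by
    simp [List.take]
    intro ha hb hc
    exact absurd ⟨ha, hb, hc⟩ hx
  rw [if_neg ht3]
  simp [List.drop]

-- A on a suffix of length < 2 is 0.
theorem pvAuxA_short (t : List Char) (h : t.length < 2) : pvAuxA t = 0 := by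
  match t, h with
  | [], _ => rw [pvAuxA]; simp
  | [a], _ => rw [pvAuxA]; simp

-- The scan starting at index i, with accumulator c, computes c + A's count of the suffix.
theorem pvGoB_eq (s : List Char) (k i : Nat) (c : Int) (hk : s.length - i ≤ k) :
    pvGoB s i c = c + pvAuxA (s.drop i) := by
  induction k generalizing i c with
  | zero =>
    rw [pvGoB, if_neg (by omega : ¬ i + 1 < s.length),
      pvAuxA_short (s.drop i) (by simp; omega)]
    simp
  | succ k ih =>
    by_cases h1 : i + 1 < s.length
    · have hi0 : i < s.length := by omega
      have hd : s.drop i = s[i] :: s[i + 1] :: s.drop (i + 2) := by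
        rw [List.drop_eq_getElem_cons hi0, List.drop_eq_getElem_cons h1]
      rw [pvGoB, if_pos h1]
      have g0 : s.getD i ' ' = s[i] := List.getD_eq_getElem s ' ' hi0
      have g1 : s.getD (i + 1) ' ' = s[i + 1] := List.getD_eq_getElem s ' ' h1
      by_cases hh : s.getD i ' ' = 'h' ∧ s.getD (i + 1) ' ' = 'i'
      · obtain ⟨e0, e1⟩ := hh
        rw [if_pos ⟨e0, e1⟩, ih (i + 2) (c + 1) (by omega)]
        rw [g0] at e0; rw [g1] at e1
        rw [hd, e0, e1, pvAuxA_hi]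
        ring
      · rw [if_neg hh]
        rw [g0, g1] at hh
        by_cases hx : i + 2 < s.length ∧ s.getD i ' ' = 'x' ∧ s.getD (i + 1) ' ' = 'h' ∧
            s.getD (i + 2) ' ' = 'i'
        · obtain ⟨h2, e0, e1, e2⟩ := hx
          have g2 : s.getD (i + 2) ' ' = s[i + 2] := List.getD_eq_getElem s ' ' h2
          rw [g0] at e0; rw [g1] at e1; rw [g2] at e2
          rw [if_pos ⟨h2, by rw [g0, e0], by rw [g1, e1], by rw [g2, e2]⟩,
            ih (i + 3) c (by omega)]
          have hd2 : s.drop i = s[i] :: s[i + 1] :: s[i + 2] :: s.drop (i + 3) := by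
            rw [hd, List.drop_eq_getElem_cons h2]
          rw [hd2, e0, e1, e2, pvAuxA_xhi]
        · rw [if_neg hx, ih (i + 1) c (by omega)]
          have hd1 : s.drop (i + 1) = s[i + 1] :: s.drop (i + 2) :=
            List.drop_eq_getElem_cons h1
          by_cases h2 : i + 2 < s.length
          · have g2 : s.getD (i + 2) ' ' = s[i + 2] := List.getD_eq_getElem s ' ' h2
            have hx' : ¬ (s[i] = 'x' ∧ s[i + 1] = 'h' ∧ s[i + 2] = 'i') := by
              intro ⟨a, b, cc⟩
              exact hx ⟨h2, by rw [g0, a], by rw [g1, b], by rw [g2, cc]⟩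
            have hd2 : s.drop (i + 2) = s[i + 2] :: s.drop (i + 3) :=
              List.drop_eq_getElem_cons h2
            rw [hd, hd1, hd2, pvAuxA_step _ _ _ _ hh hx']
          · have hr : s.drop (i + 2) = [] := List.drop_eq_nil_of_le (by omega)
            rw [hd, hd1, hr, pvAuxA_two _ _ hh, pvAuxA_short [s[i + 1]] (by simp)]
    · rw [pvGoB, if_neg h1, pvAuxA_short (s.drop i) (by simp; omega)]
      simp

-- ===== VERDICT (by name: the statement is the Claim_ definition above) =====
theorem countHi2_spec : Claim_equal_countHi2 := by
  intro str _
  unfold Spec_countHi2 countHi2 countHi2_alt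
  rw [pvGoB_eq str.toList str.toList.length 0 0 (by omega)]
  simp
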